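-- pv_equiv track=rewrite | github.com/Bertie97/pyctlib | pyctlib/logging.py | formatter_message
-- ===== SOURCE A (Python) =====
-- color_dict = {c: "\033[1;%dm" % (30+index) for index, c in enumerate(["BLACK", "RED", "GREEN", "YELLOW", "BLUE", "MAGENTA", "CYAN", "WHITE"])}
--
-- def formatter_message(message: str, use_color: bool=True):
--     if use_color:
--         for color, seq in color_dict.items():
--             message = message.replace("(%{})".format(color), seq)
--         message = message.replace("(%RESET)", "\033[0m")
--     else:
--         for color, seq in color_dict.items():
--             message = message.replace("(%{})".format(color), "")
--         message = message.replace("(%RESET)", "")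
--     return message
-- ===== SOURCE B (Python) =====
-- COLORS = ["BLACK", "RED", "GREEN", "YELLOW", "BLUE", "MAGENTA", "CYAN", "WHITE"]
--
-- def formatter_message(message: str, use_color: bool=True):
--     # one table of full tokens -> replacement ('' when colors are off), one left-to-right pass
--     table = {"(%{})".format(c): ("\033[1;%dm" % (30 + i) if use_color else "")
--              for i, c in enumerate(COLORS)}
--     table["(%RESET)"] = "\033[0m" if use_color else ""
--     out = []
--     i = 0
--     n = len(message)
--     while i < n:
--         for tok, rep in table.items():
--             if message.startswith(tok, i):
--                 out.append(rep)
--                 i += len(tok)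
--                 break
--         else:
--             out.append(message[i])
--             i += 1
--     return "".join(out)
-- ===== Notes on version B (the rewrite author's own statement) =====
-- stated objective: alternative
-- what changed: Replaces A's nine sequential whole-string replace passes by one table of token->replacement and a single left-to-right scan that substitutes each token where it is found.
-- outside the precondition, e.g. on formatter_message('(%(%BLACK)RESET)', False): A returns '', B returns '(%RESET)'; on formatter_message('((%BLACK)%RED)', False): A returns '', B returns '(%RED)'
import Mathlib
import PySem

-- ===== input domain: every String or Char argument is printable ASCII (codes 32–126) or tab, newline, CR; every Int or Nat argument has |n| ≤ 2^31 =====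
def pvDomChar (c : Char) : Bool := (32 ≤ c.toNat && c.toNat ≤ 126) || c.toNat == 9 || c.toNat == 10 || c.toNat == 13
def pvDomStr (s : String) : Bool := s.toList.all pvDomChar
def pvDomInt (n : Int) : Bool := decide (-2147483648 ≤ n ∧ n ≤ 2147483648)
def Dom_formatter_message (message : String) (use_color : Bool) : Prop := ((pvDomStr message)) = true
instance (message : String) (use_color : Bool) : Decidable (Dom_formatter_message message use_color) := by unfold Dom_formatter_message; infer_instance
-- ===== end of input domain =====

-- B replaces A's nine sequential whole-string replace passes by one token→replacement table and a
-- single left-to-right scan (objective: alternative single-pass algorithm, not claimed faster).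

-- ===== PORT A =====
def formatter_message (message : String) (use_color : Bool) : String :=
  if use_color then
    let m := PySem.Str.replace message "(%BLACK)" "\x1b[1;30m"
    let m := PySem.Str.replace m "(%RED)" "\x1b[1;31m"
    let m := PySem.Str.replace m "(%GREEN)" "\x1b[1;32m"
    let m := PySem.Str.replace m "(%YELLOW)" "\x1b[1;33m"
    let m := PySem.Str.replace m "(%BLUE)" "\x1b[1;34m"
    let m := PySem.Str.replace m "(%MAGENTA)" "\x1b[1;35m"
    let m := PySem.Str.replace m "(%CYAN)" "\x1b[1;36m"
    let m := PySem.Str.replace m "(%WHITE)" "\x1b[1;37m"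
    PySem.Str.replace m "(%RESET)" "\x1b[0m"
  else
    let m := PySem.Str.replace message "(%BLACK)" ""
    let m := PySem.Str.replace m "(%RED)" ""
    let m := PySem.Str.replace m "(%GREEN)" ""
    let m := PySem.Str.replace m "(%YELLOW)" ""
    let m := PySem.Str.replace m "(%BLUE)" ""
    let m := PySem.Str.replace m "(%MAGENTA)" ""
    let m := PySem.Str.replace m "(%CYAN)" ""
    let m := PySem.Str.replace m "(%WHITE)" ""
    PySem.Str.replace m "(%RESET)" ""

-- ===== PORT B =====
-- B's token → ANSI-sequence table, in the same order B's Python builds it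
def pvColorTable : List (List Char × List Char) :=
  [("(%BLACK)".toList, "\x1b[1;30m".toList),
   ("(%RED)".toList, "\x1b[1;31m".toList),
   ("(%GREEN)".toList, "\x1b[1;32m".toList),
   ("(%YELLOW)".toList, "\x1b[1;33m".toList),
   ("(%BLUE)".toList, "\x1b[1;34m".toList),
   ("(%MAGENTA)".toList, "\x1b[1;35m".toList),
   ("(%CYAN)".toList, "\x1b[1;36m".toList),
   ("(%WHITE)".toList, "\x1b[1;37m".toList),
   ("(%RESET)".toList, "\x1b[0m".toList)]

-- B's single left-to-right pass: at each position, substitute the table token that starts there, else copy the char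
def pvScanTable (T : List (List Char × List Char)) : List Char → List Char
  | [] => []
  | c :: cs =>
    match T.find? (fun u => u.1.isPrefixOf (c :: cs)) with
    | some u => u.2 ++ pvScanTable T (cs.drop (u.1.length - 1))
    | none => c :: pvScanTable T cs
termination_by l => l.length
decreasing_by
  all_goals simp [List.length_drop]

def formatter_message_alt (message : String) (use_color : Bool) : String :=
  let table := pvColorTable.map (fun p => (p.1, if use_color then p.2 else []))
  String.ofList (pvScanTable table message.toList)

-- ===== PRECONDITION & SPEC =====
def pvToks : List (List Char) :=
  ["(%BLACK)".toList, "(%RED)".toList, "(%GREEN)".toList, "(%YELLOW)".toList, "(%BLUE)".toList,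
   "(%MAGENTA)".toList, "(%CYAN)".toList, "(%WHITE)".toList, "(%RESET)".toList]

-- Pre_ excludes messages (only in the use_color=False case) in which deleting one color token can
-- splice together a new token occurrence: there A's result is an accident of its dict-iteration
-- replacement order, while B's single pass returns the equally defensible leftmost-scan value.
def Pre_formatter_message (message : String) (use_color : Bool) : Prop :=
  use_color = true ∨
  ∀ t ∈ pvToks, ∀ u ∈ pvToks, ∀ m : Nat, m < t.length → 0 < m →
    ¬ (t.take m ++ u) <:+: message.toList
instance (message : String) (use_color : Bool) : Decidable (Pre_formatter_message message use_color) := by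
  unfold Pre_formatter_message; infer_instance

def pvWitness_formatter_message : String × Bool := ("done (%GREEN)ok(%RESET)!", false)

def Spec_formatter_message (message : String) (use_color : Bool) (out : String) : Prop :=
  out = formatter_message_alt message use_color
instance (message : String) (use_color : Bool) (out : String) : Decidable (Spec_formatter_message message use_color out) := by
  unfold Spec_formatter_message; infer_instance

-- ===== CLAIM (what is proved, stated in full; the proofs are below) =====
def Claim_equal_formatter_message : Prop := ∀ (message : String) (use_color : Bool), Dom_formatter_message message use_color → Pre_formatter_message message use_color → Spec_formatter_message message use_color (formatter_message message use_color)

-- ===== LEMMAS AND PROOFS =====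

-- A's replace as a single scan for one pattern
def pvScanOne (t r : List Char) : List Char → List Char
  | [] => []
  | c :: cs =>
    if t.isPrefixOf (c :: cs) then r ++ pvScanOne t r (cs.drop (t.length - 1))
    else c :: pvScanOne t r cs
termination_by l => l.length
decreasing_by
  all_goals simp [List.length_drop]

-- sequential application of replace stages, in A's order
def pvApplyAll : List (List Char × List Char) → List Char → List Char
  | [], s => s
  | (t, r) :: L, s => pvApplyAll L (pvScanOne t r s)

theorem pvScanOne_nil (t r : List Char) : pvScanOne t r [] = [] := by
  rw [pvScanOne.eq_def]

theorem pvScanOne_cons_pos (t r : List Char) (c : Char) (cs : List Char)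
    (h : t.isPrefixOf (c :: cs) = true) :
    pvScanOne t r (c :: cs) = r ++ pvScanOne t r (cs.drop (t.length - 1)) := by
  rw [pvScanOne.eq_def]; simp [h]

theorem pvScanOne_cons_neg (t r : List Char) (c : Char) (cs : List Char)
    (h : t.isPrefixOf (c :: cs) = false) :
    pvScanOne t r (c :: cs) = c :: pvScanOne t r cs := by
  rw [pvScanOne.eq_def]; simp [h]

theorem pvScanTable_nil (T : List (List Char × List Char)) : pvScanTable T [] = [] := by
  rw [pvScanTable.eq_def]

theorem pvScanTable_cons_some (T : List (List Char × List Char)) (c : Char) (cs : List Char)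
    (u : List Char × List Char) (h : T.find? (fun u => u.1.isPrefixOf (c :: cs)) = some u) :
    pvScanTable T (c :: cs) = u.2 ++ pvScanTable T (cs.drop (u.1.length - 1)) := by
  rw [pvScanTable.eq_def]; simp [h]

theorem pvScanTable_cons_none (T : List (List Char × List Char)) (c : Char) (cs : List Char)
    (h : T.find? (fun u => u.1.isPrefixOf (c :: cs)) = none) :
    pvScanTable T (c :: cs) = c :: pvScanTable T cs := by
  rw [pvScanTable.eq_def]; simp [h]

-- bridge: PySem's replace is the single-token scan
theorem pvGo_eq (t r : List Char) (ht : t ≠ []) :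
    ∀ (fuel : Nat) (l acc : List Char), l.length ≤ fuel →
      PySem.Chars.replace.go t r fuel l acc = acc.reverse ++ pvScanOne t r l := by
  intro fuel
  induction fuel with
  | zero =>
    intro l acc hl
    have hl0 : l = [] := by cases l <;> simp_all
    subst hl0
    rw [PySem.Chars.replace.go.eq_def]
    simp [pvScanOne_nil]
  | succ n ih =>
    intro l acc hl
    cases l with
    | nil => rw [PySem.Chars.replace.go.eq_def]; simp [pvScanOne_nil]
    | cons c cs =>
      obtain ⟨k, hk⟩ : ∃ k, t.length = k + 1 := by
        cases t with
        | nil => exact absurd rfl ht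
        | cons a as => exact ⟨as.length, rfl⟩
      rw [PySem.Chars.replace.go.eq_def]
      by_cases h : t.isPrefixOf (c :: cs) = true
      · simp only [h, if_true]
        rw [hk, List.drop_succ_cons]
        rw [ih (cs.drop k) (r.reverse ++ acc) (by simp [List.length_drop]; simp at hl; omega)]
        rw [pvScanOne_cons_pos t r c cs h, hk]
        simp
      · simp only [h]
        rw [ih cs (c :: acc) (by simp at hl ⊢; omega)]
        rw [pvScanOne_cons_neg t r c cs (by simp only [Bool.not_eq_true] at h; exact h)]
        simp

theorem pvReplace_eq (t r s : List Char) (ht : t ≠ []) :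
    PySem.Chars.replace s t r = pvScanOne t r s := by
  rw [PySem.Chars.replace]
  have : t.isEmpty = false := by simpa [List.isEmpty_iff] using ht
  rw [this]
  simpa using pvGo_eq t r ht s.length s [] le_rfl

theorem pvScanTable_empty (s : List Char) : pvScanTable [] s = s := by
  induction s with
  | nil => exact pvScanTable_nil []
  | cons c cs ih =>
    rw [pvScanTable_cons_none [] c cs (by simp)]
    rw [ih]

-- a scan passes unchanged over a block whose characters do not occur in the pattern
theorem pvPass (t r : List Char) (ht : t ≠ []) :
    ∀ (w X : List Char), (∀ a ∈ w, a ∉ t) → pvScanOne t r (w ++ X) = w ++ pvScanOne t r X := by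
  intro w
  induction w with
  | nil => intro X _; simp
  | cons a w' ih =>
    intro X hw
    have hnp : t.isPrefixOf (a :: (w' ++ X)) = false := by
      rw [Bool.eq_false_iff]
      intro hpre
      rw [List.isPrefixOf_iff_prefix] at hpre
      cases t with
      | nil => exact ht rfl
      | cons b ts =>
        rw [List.cons_prefix_cons] at hpre
        exact hw a (by simp) (hpre.1 ▸ List.mem_cons_self)
    rw [List.cons_append, pvScanOne_cons_neg t r a (w' ++ X) hnp]
    rw [ih X (fun a ha => hw a (List.mem_cons_of_mem _ ha))]
    simp

-- a table scan copies a block verbatim when no table token matches anywhere inside it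
theorem pvCopy (T : List (List Char × List Char)) :
    ∀ (w X : List Char),
      (∀ k : Nat, k < w.length → ∀ u ∈ T, ¬ u.1 <+: (w.drop k ++ X)) →
      pvScanTable T (w ++ X) = w ++ pvScanTable T X := by
  intro w
  induction w with
  | nil => intro X _; simp
  | cons a w' ih =>
    intro X hw
    have hf : T.find? (fun u => u.1.isPrefixOf (a :: (w' ++ X))) = none := by
      rw [List.find?_eq_none]
      intro u hu
      rw [Bool.not_eq_true, Bool.eq_false_iff]
      intro hpre
      rw [List.isPrefixOf_iff_prefix] at hpre
      exact hw 0 (by simp) u hu (by simpa using hpre)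
    rw [List.cons_append, pvScanTable_cons_none T a (w' ++ X) hf]
    rw [ih X (fun k hk u hu => hw (k + 1) (by simpa using hk) u hu)]
    simp

-- if the stage token's tail did not match before the table scan, it does not match after it
theorem pvMid (T : List (List Char × List Char)) (t : List Char)
    (h4 : ∀ u ∈ T, ∀ a ∈ u.2, a ∉ t) :
    ∀ (X : List Char) (m : Nat), m < t.length → 0 < m →
      (∀ u ∈ T, u.2 = [] → ∀ m' : Nat, m' < t.length → 0 < m' →
        ¬ (t.take m' ++ u.1) <:+: (t.take m ++ X)) →
      ¬ t.drop m <+: X → ¬ t.drop m <+: pvScanTable T X := by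
  intro X
  induction X with
  | nil =>
    intro m hm _ _ _
    rw [pvScanTable_nil]
    intro hpre
    have := List.eq_nil_of_prefix_nil hpre
    have := congrArg List.length this
    simp at this
    omega
  | cons a X' ih =>
    intro m hm hm0 hNF hnot
    have hdm : t.drop m = t[m] :: t.drop (m + 1) := List.drop_eq_getElem_cons hm
    cases hf : T.find? (fun u => u.1.isPrefixOf (a :: X')) with
    | some u =>
      have humem := List.mem_of_find?_eq_some hf
      have hupre : u.1 <+: (a :: X') := by
        have := List.find?_some hf
        simpa [List.isPrefixOf_iff_prefix] using this
      rw [pvScanTable_cons_some T a X' u hf]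
      cases hu2 : u.2 with
      | nil =>
        intro _
        obtain ⟨rest, hrest⟩ := hupre
        exact hNF u humem hu2 m hm hm0 ⟨[], rest, by simp [← hrest]⟩
      | cons b bs =>
        intro hpre
        rw [hdm] at hpre
        rw [List.cons_append, List.cons_prefix_cons] at hpre
        have hb : b ∈ u.2 := by rw [hu2]; simp
        exact h4 u humem b hb (hpre.1 ▸ List.getElem_mem hm)
    | none =>
      rw [pvScanTable_cons_none T a X' hf]
      intro hpre
      rw [hdm, List.cons_prefix_cons] at hpre
      obtain ⟨ha, htail⟩ := hpre
      by_cases hm1 : m + 1 < t.length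
      · have hctx : t.take (m + 1) ++ X' = t.take m ++ (a :: X') := by
          rw [List.take_add_one, List.getElem?_eq_getElem hm]
          simp [ha]
        refine (ih (m + 1) hm1 (by omega) ?_ ?_) htail
        · intro u hu hu2 m' hm' hm'0 hinf
          exact hNF u hu hu2 m' hm' hm'0 (hctx ▸ hinf)
        · intro hpre'
          exact hnot (by rw [hdm]; exact List.cons_prefix_cons.mpr ⟨ha, hpre'⟩)
      · have hdnil : t.drop (m + 1) = [] := by rw [List.drop_eq_nil_iff]; omega
        exact hnot (by rw [hdm, hdnil]; exact List.cons_prefix_cons.mpr ⟨ha, List.nil_prefix⟩)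

-- fuse: one more replace stage after a table scan = the scan with the stage appended
theorem pvFuse (T : List (List Char × List Char)) (t r : List Char)
    (h2 : t ≠ [])
    (h1 : ∀ u ∈ T, u.1 ≠ [])
    (h4 : ∀ u ∈ T, ∀ a ∈ u.2, a ∉ t)
    (h5 : ∀ u ∈ T, ∀ k : Nat, k < t.length → 0 < k → u.1.head? ≠ t[k]?) :
    ∀ (s : List Char),
      (∀ u ∈ T, u.2 = [] → ∀ m : Nat, m < t.length → 0 < m → ¬ (t.take m ++ u.1) <:+: s) →
      pvScanOne t r (pvScanTable T s) = pvScanTable (T ++ [(t, r)]) s := by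
  suffices H : ∀ (n : Nat) (s : List Char), s.length ≤ n →
      (∀ u ∈ T, u.2 = [] → ∀ m : Nat, m < t.length → 0 < m → ¬ (t.take m ++ u.1) <:+: s) →
      pvScanOne t r (pvScanTable T s) = pvScanTable (T ++ [(t, r)]) s by
    intro s hNF; exact H s.length s le_rfl hNF
  intro n
  induction n with
  | zero =>
    intro s hs _
    have : s = [] := by cases s <;> simp_all
    subst this
    rw [pvScanTable_nil, pvScanTable_nil, pvScanOne_nil]
  | succ n ih =>
    intro s hs hNF
    cases s with
    | nil => rw [pvScanTable_nil, pvScanTable_nil, pvScanOne_nil]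
    | cons c cs =>
      have hsuf : ∀ (Y : List Char), Y <:+ (c :: cs) →
          (∀ u ∈ T, u.2 = [] → ∀ m : Nat, m < t.length → 0 < m → ¬ (t.take m ++ u.1) <:+: Y) := by
        intro Y hY u hu hu2 m hm hm0 hinf
        exact hNF u hu hu2 m hm hm0 (hinf.trans hY.isInfix)
      cases hf : T.find? (fun u => u.1.isPrefixOf (c :: cs)) with
      | some u =>
        have humem := List.mem_of_find?_eq_some hf
        have hupre : u.1 <+: (c :: cs) := by
          have := List.find?_some hf
          simpa [List.isPrefixOf_iff_prefix] using this
        have hu1 : u.1 ≠ [] := h1 u humem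
        have hu1len : 0 < u.1.length := List.length_pos_of_ne_nil hu1
        rw [pvScanTable_cons_some T c cs u hf]
        rw [pvPass t r h2 u.2 _ (fun a ha => h4 u humem a ha)]
        have hdroplen : (cs.drop (u.1.length - 1)).length ≤ n := by
          simp only [List.length_drop]
          have : cs.length + 1 ≤ n + 1 := by simpa using hs
          omega
        have hdropsuf : cs.drop (u.1.length - 1) <:+ (c :: cs) :=
          (List.drop_suffix _ _).trans (List.suffix_cons c cs)
        rw [ih (cs.drop (u.1.length - 1)) hdroplen (hsuf _ hdropsuf)]
        rw [pvScanTable_cons_some (T ++ [(t, r)]) c cs u (by rw [List.find?_append, hf]; rfl)]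
      | none =>
        have hnone : ∀ u ∈ T, ¬ u.1 <+: (c :: cs) := by
          intro u hu hpre
          have := List.find?_eq_none.mp hf u hu
          rw [List.isPrefixOf_iff_prefix] at this
          exact this (by simpa using hpre)
        by_cases hts : t <+: (c :: cs)
        · obtain ⟨X, hX⟩ := hts
          obtain ⟨th, tt, rfl⟩ : ∃ th tt, t = th :: tt := by
            cases t with
            | nil => exact absurd rfl h2
            | cons a as => exact ⟨a, as, rfl⟩
          have hcopy : pvScanTable T ((th :: tt) ++ X) = (th :: tt) ++ pvScanTable T X := by
            apply pvCopy
            intro k hk u hu hpre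
            cases k with
            | zero =>
              simp only [List.drop_zero] at hpre
              rw [hX] at hpre
              exact hnone u hu hpre
            | succ k' =>
              have hk' : k' + 1 < (th :: tt).length := hk
              have hdk : (th :: tt).drop (k' + 1) = (th :: tt)[k' + 1] :: (th :: tt).drop (k' + 2) :=
                List.drop_eq_getElem_cons hk'
              obtain ⟨b, v, hbv⟩ : ∃ b v, u.1 = b :: v := by
                cases hu1 : u.1 with
                | nil => exact absurd hu1 (h1 u hu)
                | cons b v => exact ⟨b, v, rfl⟩
              rw [hbv, hdk, List.cons_append, List.cons_prefix_cons] at hpre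
              have h5' := h5 u hu (k' + 1) hk' (by omega)
              rw [hbv, List.head?_cons, List.getElem?_eq_getElem hk'] at h5'
              exact h5' (by rw [hpre.1])
          rw [← hX, hcopy]
          have hpos : (th :: tt).isPrefixOf (th :: (tt ++ pvScanTable T X)) = true := by
            rw [List.isPrefixOf_iff_prefix, ← List.cons_append]
            exact List.prefix_append _ _
          rw [List.cons_append, pvScanOne_cons_pos _ _ _ _ hpos]
          have hdl : (tt ++ pvScanTable T X).drop ((th :: tt).length - 1) = pvScanTable T X := by
            simp
          rw [hdl]
          have hXlen : X.length ≤ n := by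
            have := congrArg List.length hX
            simp at this hs
            omega
          rw [ih X hXlen (hsuf X ⟨th :: tt, hX⟩)]
          have hfindT : T.find? (fun u => u.1.isPrefixOf (th :: (tt ++ X))) = none := by
            rw [List.find?_eq_none]
            intro u hu
            rw [Bool.not_eq_true, Bool.eq_false_iff]
            intro hh
            rw [List.isPrefixOf_iff_prefix] at hh
            exact hnone u hu (by rw [← hX, List.cons_append]; exact hh)
          have hfind : (T ++ [(th :: tt, r)]).find?
              (fun u => u.1.isPrefixOf (th :: (tt ++ X))) = some (th :: tt, r) := by
            rw [List.find?_append, hfindT]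
            have : (th :: tt).isPrefixOf (th :: (tt ++ X)) = true := by
              rw [List.isPrefixOf_iff_prefix, ← List.cons_append]
              exact List.prefix_append _ _
            simp [List.find?, this]
          rw [List.cons_append, pvScanTable_cons_some _ _ _ _ hfind]
          have hdl2 : (tt ++ X).drop ((th :: tt).length - 1) = X := by
            simp
          rw [hdl2]
        · rw [pvScanTable_cons_none T c cs hf]
          have hnotW : ¬ t <+: (c :: pvScanTable T cs) := by
            intro hpre
            obtain ⟨th, tt, rfl⟩ : ∃ th tt, t = th :: tt := by
              cases t with
              | nil => exact absurd rfl h2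
              | cons a as => exact ⟨a, as, rfl⟩
            rw [List.cons_prefix_cons] at hpre
            obtain ⟨hth, htt⟩ := hpre
            cases tt with
            | nil => exact hts (List.cons_prefix_cons.mpr ⟨hth, List.nil_prefix⟩)
            | cons t2 ts =>
              have hlen : 1 < (th :: t2 :: ts).length := by simp
              refine pvMid T (th :: t2 :: ts) h4 cs 1 hlen (by omega) ?_ ?_ ?_
              · intro u hu hu2 m' hm' hm'0 hinf
                refine hNF u hu hu2 m' hm' hm'0 ?_
                have : (th :: t2 :: ts).take 1 ++ cs = c :: cs := by
                  simp [hth]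
                rw [← this]
                exact hinf
              · intro hh
                exact hts (List.cons_prefix_cons.mpr ⟨hth, by simpa using hh⟩)
              · simpa using htt
          have hnp : t.isPrefixOf (c :: pvScanTable T cs) = false := by
            rw [Bool.eq_false_iff]
            intro hh
            exact hnotW (List.isPrefixOf_iff_prefix.mp hh)
          rw [pvScanOne_cons_neg t r _ _ hnp]
          have hcs : cs.length ≤ n := by simp at hs; omega
          rw [ih cs hcs (hsuf cs (List.suffix_cons c cs))]
          have hfnone : (T ++ [(t, r)]).find? (fun u => u.1.isPrefixOf (c :: cs)) = none := by
            rw [List.find?_append, hf]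
            have : t.isPrefixOf (c :: cs) = false := by
              rw [Bool.eq_false_iff]
              intro hh
              exact hts (List.isPrefixOf_iff_prefix.mp hh)
            simp [List.find?, this]
          rw [pvScanTable_cons_none (T ++ [(t, r)]) c cs hfnone]

theorem pvChain (L : List (List Char × List Char)) :
    ∀ (T : List (List Char × List Char)) (s : List Char),
      (∀ u ∈ T ++ L, u.1 ≠ []) →
      (∀ u ∈ T ++ L, ∀ v ∈ T ++ L, ∀ a ∈ u.2, a ∉ v.1) →
      (∀ u ∈ T ++ L, ∀ v ∈ T ++ L, ∀ k : Nat, k < v.1.length → 0 < k → u.1.head? ≠ v.1[k]?) →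
      (∀ u ∈ T ++ L, ∀ v ∈ T ++ L, u.2 = [] → ∀ m : Nat, m < v.1.length → 0 < m →
        ¬ (v.1.take m ++ u.1) <:+: s) →
      pvApplyAll L (pvScanTable T s) = pvScanTable (T ++ L) s := by
  induction L with
  | nil => intro T s _ _ _ _; simp [pvApplyAll]
  | cons p L' ih =>
    obtain ⟨t, r⟩ := p
    intro T s hC1 hC2 hC3 hC4
    have hmem : (t, r) ∈ T ++ (t, r) :: L' := by simp
    have hstep : pvScanOne t r (pvScanTable T s) = pvScanTable (T ++ [(t, r)]) s := by
      apply pvFuse T t r (hC1 _ hmem)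
        (fun u hu => hC1 u (List.mem_append_left _ hu))
        (fun u hu a ha => hC2 u (List.mem_append_left _ hu) (t, r) hmem a ha)
        (fun u hu k hk hk0 => hC3 u (List.mem_append_left _ hu) (t, r) hmem k hk hk0)
      exact fun u hu hu2 m hm hm0 => hC4 u (List.mem_append_left _ hu) (t, r) hmem hu2 m hm hm0
    show pvApplyAll L' (pvScanOne t r (pvScanTable T s)) = pvScanTable (T ++ (t, r) :: L') s
    rw [hstep]
    have hassoc : (T ++ [(t, r)]) ++ L' = T ++ (t, r) :: L' := by simp
    rw [← hassoc]
    apply ih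
    · rw [hassoc]; exact hC1
    · rw [hassoc]; exact hC2
    · rw [hassoc]; exact hC3
    · rw [hassoc]; exact hC4

-- the composed A-side scans equal B's one-pass table scan, per use_color branch
theorem pvTable_head : ∀ u ∈ pvColorTable, u.1.head? = some '(' := by
  simp [pvColorTable]

theorem pvTable_paren : ∀ v ∈ pvColorTable, '(' ∉ v.1.drop 1 := by
  simp [pvColorTable]

theorem pvTable_cross : ∀ u ∈ pvColorTable, ∀ v ∈ pvColorTable,
    ∀ k : Nat, k < v.1.length → 0 < k → u.1.head? ≠ v.1[k]? := by
  intro u hu v hv k hk hk0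
  rw [pvTable_head u hu]
  intro heq
  apply pvTable_paren v hv
  have hdg : (v.1.drop 1)[k - 1]? = some '(' := by
    rw [List.getElem?_drop]
    have : 1 + (k - 1) = k := by omega
    rw [this, ← heq]
  exact List.mem_of_getElem? hdg

theorem pvMain_true (s : List Char) :
    pvApplyAll pvColorTable s = pvScanTable pvColorTable s := by
  have h := pvChain pvColorTable [] s
    (by intro u hu; exact (by simp [pvColorTable] : ∀ u ∈ pvColorTable, u.1 ≠ []) u (by simpa using hu))
    (by
      intro u hu v hv a ha
      exact (by simp [pvColorTable] : ∀ u ∈ pvColorTable, ∀ v ∈ pvColorTable, ∀ a ∈ u.2, a ∉ v.1)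
        u (by simpa using hu) v (by simpa using hv) a ha)
    (by
      intro u hu v hv k hk hk0
      exact pvTable_cross u (by simpa using hu) v (by simpa using hv) k hk hk0)
    (by
      intro u hu v hv h2 m hm hm0
      have : u.2 ≠ [] := by
        have hall : ∀ u ∈ pvColorTable, u.2 ≠ [] := by simp [pvColorTable]
        exact hall u (by simpa using hu)
      exact absurd h2 this)
  rw [pvScanTable_empty] at h
  simpa using h

theorem pvMain_false (s : List Char)
    (hNF : ∀ t ∈ pvToks, ∀ u ∈ pvToks, ∀ m : Nat, m < t.length → 0 < m →
      ¬ (t.take m ++ u) <:+: s) :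
    pvApplyAll (pvColorTable.map (fun p => (p.1, ([] : List Char)))) s =
      pvScanTable (pvColorTable.map (fun p => (p.1, ([] : List Char)))) s := by
  have hproj : ∀ w ∈ pvColorTable.map (fun p => (p.1, ([] : List Char))), w.1 ∈ pvColorTable.map Prod.fst := by
    intro w hw
    simp only [List.mem_map] at hw ⊢
    obtain ⟨p, hp, rfl⟩ := hw
    exact ⟨p, hp, rfl⟩
  have h := pvChain (pvColorTable.map (fun p => (p.1, ([] : List Char)))) [] s
    (by
      intro u hu
      have h0 : ∀ q ∈ pvColorTable.map Prod.fst, q ≠ [] := by simp [pvColorTable]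
      exact h0 u.1 (hproj u (by simpa using hu)))
    (by
      intro u hu v hv a ha
      rw [List.nil_append, List.mem_map] at hu
      obtain ⟨p, hp, rfl⟩ := hu
      simp at ha)
    (by
      intro u hu v hv k hk hk0
      have hh : ∀ q ∈ pvColorTable.map Prod.fst, q.head? = some '(' := by simp [pvColorTable]
      have hp2 : ∀ q ∈ pvColorTable.map Prod.fst, '(' ∉ q.drop 1 := by simp [pvColorTable]
      rw [hh u.1 (hproj u (by simpa using hu))]
      intro heq
      apply hp2 v.1 (hproj v (by simpa using hv))
      have hdg : (v.1.drop 1)[k - 1]? = some '(' := by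
        rw [List.getElem?_drop]
        have : 1 + (k - 1) = k := by omega
        rw [this, ← heq]
      exact List.mem_of_getElem? hdg)
    (by
      intro u hu v hv _ m hm hm0
      have hPT : pvColorTable.map Prod.fst = pvToks := by simp [pvColorTable, pvToks]
      exact hNF v.1 (hPT ▸ hproj v (by simpa using hv)) u.1 (hPT ▸ hproj u (by simpa using hu)) m hm hm0)
  rw [pvScanTable_empty] at h
  simpa using h

-- ===== VERDICT (by name: the statement is the Claim_ definition above) =====
theorem formatter_message_spec : Claim_equal_formatter_message := by
  intro message use_color _ hpre
  unfold Spec_formatter_message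
  apply String.toList_inj.mp
  cases use_color with
  | true =>
    simp only [formatter_message, formatter_message_alt, if_true,
      String.toList_ofList, PySem.Str.toList_replace]
    rw [pvReplace_eq _ _ _ (by decide), pvReplace_eq _ _ _ (by decide),
      pvReplace_eq _ _ _ (by decide), pvReplace_eq _ _ _ (by decide),
      pvReplace_eq _ _ _ (by decide), pvReplace_eq _ _ _ (by decide),
      pvReplace_eq _ _ _ (by decide), pvReplace_eq _ _ _ (by decide),
      pvReplace_eq _ _ _ (by decide)]
    have := pvMain_true message.toList
    simpa [pvApplyAll, pvColorTable] using this
  | false =>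
    have hNF : ∀ t ∈ pvToks, ∀ u ∈ pvToks, ∀ m : Nat, m < t.length → 0 < m →
        ¬ (t.take m ++ u) <:+: message.toList := by
      cases hpre with
      | inl h => exact absurd h (by simp)
      | inr h => exact h
    simp only [formatter_message, formatter_message_alt, Bool.false_eq_true, if_false, String.toList_ofList, PySem.Str.toList_replace]
    rw [pvReplace_eq _ _ _ (by decide), pvReplace_eq _ _ _ (by decide),
      pvReplace_eq _ _ _ (by decide), pvReplace_eq _ _ _ (by decide),
      pvReplace_eq _ _ _ (by decide), pvReplace_eq _ _ _ (by decide),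
      pvReplace_eq _ _ _ (by decide), pvReplace_eq _ _ _ (by decide),
      pvReplace_eq _ _ _ (by decide)]
    have := pvMain_false message.toList hNF
    simpa [pvApplyAll, pvColorTable] using this
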